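-- pv_equiv track=rewrite | github.com/AlfRonDon/NeuraReport | scripts/architecture/enforce_backend_arch.py | _is_allowed_backend_path
-- ===== SOURCE A (Python) =====
-- BACKEND_ALLOWED_PATHS = (
--     "backend/api.py",
--     "backend/__init__.py",
--     "backend/app/",
--     "backend/engine/",
--     "backend/legacy/",
--     "backend/tests/",
--     "backend/scripts/",
-- )
--
-- def _is_allowed_backend_path(rel: str) -> bool:
--     if not rel.startswith("backend/"):
--         return True
--     for allowed in BACKEND_ALLOWED_PATHS:
--         if allowed.endswith("/"):
--             if rel.startswith(allowed):
--                 return True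
--         elif rel == allowed:
--             return True
--     return False
-- ===== SOURCE B (Python) =====
-- def _is_allowed_backend_path(rel: str) -> bool:
--     # Parse the path instead of scanning the allow-list: strip the "backend/"
--     # prefix, split off the first path component, and classify it.
--     if not rel.startswith("backend/"):
--         return True
--     rest = rel[len("backend/"):]
--     i = rest.find("/")
--     if i == -1:
--         return rest in ("api.py", "__init__.py")
--     return rest[:i] in ("app", "engine", "legacy", "tests", "scripts")
-- ===== Notes on version B (the rewrite author's own statement) =====
-- stated objective: alternative
-- what changed: Instead of scanning the allow-list with an endswith/startswith/equality branch per entry, B parses the path itself: it strips the 'backend/' prefix, splits off the first path component with find('/'), and classifies that component as an allowed directory name or the whole remainder as an allowed file name.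
import Mathlib
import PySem

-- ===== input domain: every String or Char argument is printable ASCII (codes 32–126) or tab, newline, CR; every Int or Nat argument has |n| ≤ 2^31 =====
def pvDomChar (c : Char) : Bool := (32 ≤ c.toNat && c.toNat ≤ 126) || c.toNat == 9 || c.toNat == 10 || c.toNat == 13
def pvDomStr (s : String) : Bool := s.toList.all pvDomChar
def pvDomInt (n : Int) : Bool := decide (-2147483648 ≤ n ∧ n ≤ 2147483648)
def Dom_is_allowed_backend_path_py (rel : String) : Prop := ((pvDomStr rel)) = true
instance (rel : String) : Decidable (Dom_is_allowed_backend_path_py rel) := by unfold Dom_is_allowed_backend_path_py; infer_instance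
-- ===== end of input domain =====

-- ===== PORT A =====
-- B parses the path (strip "backend/", take the first component, classify it) instead of scanning the allow-list; simpler decomposition, same cost.
def BACKEND_ALLOWED_PATHS : List String :=
  ["backend/api.py", "backend/__init__.py", "backend/app/", "backend/engine/",
   "backend/legacy/", "backend/tests/", "backend/scripts/"]

-- the for-loop with early return
def pvALoop (rel : String) : List String → Bool
  | [] => false
  | allowed :: rest =>
    if PySem.Str.endswith allowed "/" then
      if PySem.Str.startswith rel allowed then true else pvALoop rel rest
    else if rel == allowed then true else pvALoop rel rest

def is_allowed_backend_path_py (rel : String) : Bool :=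
  if !(PySem.Str.startswith rel "backend/") then true
  else pvALoop rel BACKEND_ALLOWED_PATHS

-- ===== PORT B =====
def is_allowed_backend_path_py_alt (rel : String) : Bool :=
  if !(PySem.Str.startswith rel "backend/") then true
  else
    let rest := PySem.Str.slice rel (some 8) none   -- rel[len("backend/"):]
    let i := PySem.Str.find rest "/"
    if i == -1 then
      rest == "api.py" || rest == "__init__.py"     -- rest in ("api.py", "__init__.py")
    else
      let head := PySem.Str.slice rest none (some i)  -- rest[:i]
      head == "app" || head == "engine" || head == "legacy" || head == "tests" || head == "scripts"

-- ===== PRECONDITION & SPEC =====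
def Spec_is_allowed_backend_path_py (rel : String) (out : Bool) : Prop := out = is_allowed_backend_path_py_alt rel
instance (rel : String) (out : Bool) : Decidable (Spec_is_allowed_backend_path_py rel out) := by unfold Spec_is_allowed_backend_path_py; infer_instance

-- ===== CLAIM (what is proved, stated in full; the proofs are below) =====
def Claim_equal_is_allowed_backend_path_py : Prop := ∀ (rel : String), Dom_is_allowed_backend_path_py rel → Spec_is_allowed_backend_path_py rel (is_allowed_backend_path_py rel)

-- ===== LEMMAS AND PROOFS =====

theorem pvBeq_toList (a b : String) : (a == b) = (a.toList == b.toList) := by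
  rw [Bool.eq_iff_iff]; simp [String.toList_inj]

theorem pvStartswith_decide (s p : List Char) :
    PySem.Chars.startswith s p = decide (p <+: s) := by
  rw [Bool.eq_iff_iff]; simp [PySem.Chars.startswith_iff]

-- [a] is a prefix of t.drop j  iff  t[j]? = some a
theorem pvSingleton_prefix_drop (t : List Char) (j : Nat) (a : Char) :
    [a] <+: t.drop j ↔ t[j]? = some a := by
  rw [← List.head?_drop]
  constructor
  · rintro ⟨r, hr⟩; rw [← hr]; rfl
  · intro h
    cases hd : t.drop j with
    | nil => simp [hd] at h
    | cons x r =>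
      rw [hd] at h
      refine ⟨r, ?_⟩
      simp only [List.head?_cons, Option.some.injEq] at h
      simp [h]

-- characterisation of "d ++ ['/'] is a prefix of t" at the first slash position n
theorem pvFirst_slash_prefix (t d : List Char) (n : Nat)
    (hn : t[n]? = some '/') (hmin : ∀ j, j < n → t[j]? ≠ some '/')
    (hd : '/' ∉ d) :
    (d ++ ['/']) <+: t ↔ t.take n = d := by
  constructor
  · rintro ⟨r, hr⟩
    have hdl : t[d.length]? = some '/' := by
      rw [← hr]; rw [List.append_assoc]
      rw [List.getElem?_append_right (by omega)]
      simp
    have hle : n ≤ d.length := by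
      by_contra h
      exact hmin d.length (by omega) hdl
    have hge : ¬ n < d.length := by
      intro h
      have : t[n]? = some d[n] := by
        rw [← hr, List.append_assoc, List.getElem?_append_left (by omega)]
        simp [h]
      rw [hn] at this
      exact hd (by rw [List.mem_iff_getElem]; exact ⟨n, h, by injection this with h'; exact h'.symm⟩)
    have : n = d.length := by omega
    subst this
    rw [← hr, List.append_assoc, List.take_left]
  · intro h
    have hlt : n < t.length := List.getElem?_eq_some_iff.mp hn |>.1
    have : t.take (n + 1) = d ++ ['/'] := by
      rw [List.take_add_one, h, hn]; rfl
    rw [← this]; exact List.take_prefix _ _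
-- A's loop over the constant tuple, written as the or-chain of its seven tests
theorem pvALoop_eq_or (rel : String) : pvALoop rel BACKEND_ALLOWED_PATHS =
    ((rel == "backend/api.py") || (rel == "backend/__init__.py") ||
     PySem.Str.startswith rel "backend/app/" || PySem.Str.startswith rel "backend/engine/" ||
     PySem.Str.startswith rel "backend/legacy/" || PySem.Str.startswith rel "backend/tests/" ||
     PySem.Str.startswith rel "backend/scripts/") := by
  simp only [pvALoop, BACKEND_ALLOWED_PATHS,
    show PySem.Str.endswith "backend/api.py" "/" = false from rfl,
    show PySem.Str.endswith "backend/__init__.py" "/" = false from rfl,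
    show PySem.Str.endswith "backend/app/" "/" = true from rfl,
    show PySem.Str.endswith "backend/engine/" "/" = true from rfl,
    show PySem.Str.endswith "backend/legacy/" "/" = true from rfl,
    show PySem.Str.endswith "backend/tests/" "/" = true from rfl,
    show PySem.Str.endswith "backend/scripts/" "/" = true from rfl,
    if_true]
  cases rel == "backend/api.py" <;> cases rel == "backend/__init__.py" <;>
    cases PySem.Str.startswith rel "backend/app/" <;>
    cases PySem.Str.startswith rel "backend/engine/" <;>
    cases PySem.Str.startswith rel "backend/legacy/" <;>
    cases PySem.Str.startswith rel "backend/tests/" <;>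
    cases PySem.Str.startswith rel "backend/scripts/" <;> rfl

-- for the main proof: startswith as a decidable prefix test
theorem pvStrSw_decide (rel p : String) : PySem.Str.startswith rel p = decide (p.toList <+: rel.toList) := by
  rw [PySem.Str.startswith_eq, pvStartswith_decide]

-- ===== VERDICT (by name: the statement is the Claim_ definition above) =====
theorem is_allowed_backend_path_py_spec : Claim_equal_is_allowed_backend_path_py := by
  intro rel _
  unfold Spec_is_allowed_backend_path_py is_allowed_backend_path_py is_allowed_backend_path_py_alt
  cases hsw : PySem.Str.startswith rel "backend/"
  · simp only [Bool.not_false, if_true]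
  · simp only [Bool.not_true, Bool.false_eq_true, if_false]
    rw [pvALoop_eq_or]
    -- rel = "backend/" ++ t
    obtain ⟨t, ht⟩ : "backend/".toList <+: rel.toList := by
      rw [pvStrSw_decide] at hsw; exact of_decide_eq_true hsw
    have hrel : rel.toList = "backend/".toList ++ t := ht.symm
    -- rest = rel[8:] has character list t
    have hrest : (PySem.Str.slice rel (some 8) none).toList = t := by
      rw [PySem.Str.toList_slice, PySem.Chars.slice_eq_listSlice,
          PySem.List.slice_from (xs := rel.toList) (a := 8) (by norm_num), hrel]
      exact List.drop_left (l₁ := "backend/".toList)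
    have hfind : PySem.Str.find (PySem.Str.slice rel (some 8) none) "/" = PySem.Chars.find t ['/'] := by
      rw [PySem.Str.find_eq, hrest]; rfl
    -- the two exact-file tests, on t
    have hexact : ∀ u : String, (rel == ("backend/" ++ u)) = (t == u.toList) := by
      intro u
      rw [pvBeq_toList, hrel, Bool.eq_iff_iff]
      simp only [beq_iff_eq, String.toList_append]
      exact List.append_right_inj "backend/".toList
    have hex1 : (rel == "backend/api.py") = (t == ("api.py" : String).toList) := hexact "api.py"
    have hex2 : (rel == "backend/__init__.py") = (t == ("__init__.py" : String).toList) := hexact "__init__.py"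
    -- the five prefix tests, on t
    have hswp : ∀ u : String, PySem.Str.startswith rel ("backend/" ++ u) = decide (u.toList <+: t) := by
      intro u
      rw [pvStrSw_decide, hrel]
      simp only [String.toList_append]
      rw [decide_eq_decide]
      exact List.prefix_append_right_inj "backend/".toList
    have hsw1 : PySem.Str.startswith rel "backend/app/" = decide (("app/" : String).toList <+: t) := hswp "app/"
    have hsw2 : PySem.Str.startswith rel "backend/engine/" = decide (("engine/" : String).toList <+: t) := hswp "engine/"
    have hsw3 : PySem.Str.startswith rel "backend/legacy/" = decide (("legacy/" : String).toList <+: t) := hswp "legacy/"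
    have hsw4 : PySem.Str.startswith rel "backend/tests/" = decide (("tests/" : String).toList <+: t) := hswp "tests/"
    have hsw5 : PySem.Str.startswith rel "backend/scripts/" = decide (("scripts/" : String).toList <+: t) := hswp "scripts/"
    -- rest's own equality tests, on t
    have hr1 : (PySem.Str.slice rel (some 8) none == "api.py") = (t == ("api.py" : String).toList) := by
      rw [pvBeq_toList, hrest]
    have hr2 : (PySem.Str.slice rel (some 8) none == "__init__.py") = (t == ("__init__.py" : String).toList) := by
      rw [pvBeq_toList, hrest]
    rw [hex1, hex2, hsw1, hsw2, hsw3, hsw4, hsw5, hfind, hr1, hr2]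
    cases hi : PySem.Chars.find t ['/'] == -1
    · -- a slash occurs in t, first at position n
      have hne : PySem.Chars.find t ['/'] ≠ -1 := by
        intro h; rw [h] at hi; simp at hi
      obtain ⟨hk, hp, hmin⟩ := by
        have := PySem.Chars.findFrom_natCast_spec t ['/'] 0 (by omega) (by simpa using hne)
        simpa using this
      have hk : (0:Int) ≤ PySem.Chars.find t ['/'] := hk
      set n := (PySem.Chars.find t ['/']).toNat with hn
      have hslash : t[n]? = some '/' := (pvSingleton_prefix_drop t n '/').mp hp
      have hmin' : ∀ j, j < n → t[j]? ≠ some '/' := by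
        intro j hj h
        exact hmin j (by omega) ((pvSingleton_prefix_drop t j '/').mpr h)
      have hmem : '/' ∈ t := List.mem_of_getElem? hslash
      -- head = rest[:i] has character list t.take n
      have hhead : (PySem.Str.slice (PySem.Str.slice rel (some 8) none) none (some (PySem.Chars.find t ['/']))).toList = t.take n := by
        rw [PySem.Str.toList_slice, PySem.Chars.slice_eq_listSlice, hrest,
            PySem.List.slice_to (xs := t) (b := PySem.Chars.find t ['/']) (by omega)]
      -- the exact-file tests are false (those names contain no slash)
      have hfile : ∀ u : String, '/' ∉ u.toList → (t == u.toList) = false := by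
        intro u hu
        rw [Bool.eq_false_iff]
        intro h
        exact hu (eq_of_beq h ▸ hmem)
      -- each prefix test "d/" <+: t is the test  rest[:i] == d
      have hd1 : decide (("app/" : String).toList <+: t) =
          (PySem.Str.slice (PySem.Str.slice rel (some 8) none) none (some (PySem.Chars.find t ['/'])) == "app") := by
        rw [pvBeq_toList, hhead, Bool.eq_iff_iff]
        simp only [decide_eq_true_eq, beq_iff_eq]
        exact pvFirst_slash_prefix t ("app" : String).toList n hslash hmin' (by decide)
      have hd2 : decide (("engine/" : String).toList <+: t) =
          (PySem.Str.slice (PySem.Str.slice rel (some 8) none) none (some (PySem.Chars.find t ['/'])) == "engine") := by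
        rw [pvBeq_toList, hhead, Bool.eq_iff_iff]
        simp only [decide_eq_true_eq, beq_iff_eq]
        exact pvFirst_slash_prefix t ("engine" : String).toList n hslash hmin' (by decide)
      have hd3 : decide (("legacy/" : String).toList <+: t) =
          (PySem.Str.slice (PySem.Str.slice rel (some 8) none) none (some (PySem.Chars.find t ['/'])) == "legacy") := by
        rw [pvBeq_toList, hhead, Bool.eq_iff_iff]
        simp only [decide_eq_true_eq, beq_iff_eq]
        exact pvFirst_slash_prefix t ("legacy" : String).toList n hslash hmin' (by decide)
      have hd4 : decide (("tests/" : String).toList <+: t) =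
          (PySem.Str.slice (PySem.Str.slice rel (some 8) none) none (some (PySem.Chars.find t ['/'])) == "tests") := by
        rw [pvBeq_toList, hhead, Bool.eq_iff_iff]
        simp only [decide_eq_true_eq, beq_iff_eq]
        exact pvFirst_slash_prefix t ("tests" : String).toList n hslash hmin' (by decide)
      have hd5 : decide (("scripts/" : String).toList <+: t) =
          (PySem.Str.slice (PySem.Str.slice rel (some 8) none) none (some (PySem.Chars.find t ['/'])) == "scripts") := by
        rw [pvBeq_toList, hhead, Bool.eq_iff_iff]
        simp only [decide_eq_true_eq, beq_iff_eq]
        exact pvFirst_slash_prefix t ("scripts" : String).toList n hslash hmin' (by decide)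
      rw [hfile "api.py" (by decide), hfile "__init__.py" (by decide),
          hd1, hd2, hd3, hd4, hd5]
      simp
    · -- no slash in t: the five prefix tests are all false
      have heq : PySem.Chars.find t ['/'] = -1 := by simpa using hi
      have hmem : '/' ∉ t := fun h =>
        (PySem.Chars.find_eq_neg_one_iff t ['/']).mp heq ((List.singleton_infix_iff '/' t).mpr h)
      have hdir : ∀ d : String, '/' ∈ d.toList → decide (d.toList <+: t) = false := by
        intro d hd
        rw [decide_eq_false_iff_not]
        intro h
        exact hmem (h.subset hd)
      rw [hdir "app/" (by decide), hdir "engine/" (by decide), hdir "legacy/" (by decide),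
          hdir "tests/" (by decide), hdir "scripts/" (by decide)]
      simp
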